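-- pv_equiv track=rewrite | github.com/yugvyas/AI-Resume-Analyzer | analyzer.py | parse_resume_sections
-- ===== SOURCE A (Python) =====
-- from typing import Dict, List, Optional
--
-- def parse_resume_sections(text: str) -> Dict[str, str]:
--     """
--     Parse resume into structured sections using pattern matching.
--     """
--     sections = {
--         "contact_info": "",
--         "summary": "",
--         "experience": "",
--         "education": "",
--         "skills": "",
--         "projects": "",
--         "certifications": ""
--     }
--
--     # Common section headers
--     section_patterns = {
--         "experience": ["experience", "work history", "employment", "professional experience"],
--         "education": ["education", "academic background", "qualifications"],
--         "skills": ["skills", "technical skills", "competencies", "technologies"],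
--         "projects": ["projects", "personal projects", "side projects"],
--         "certifications": ["certifications", "certificates", "licenses"],
--         "summary": ["summary", "objective", "profile", "about"]
--     }
--
--     lines = text.split('\n')
--     current_section = "summary"
--
--     for line in lines:
--         line_lower = line.lower().strip()
--
--         # Check if line is a section header
--         for section, patterns in section_patterns.items():
--             if any(pattern in line_lower for pattern in patterns):
--                 current_section = section
--                 break
--         else:
--             if line.strip():
--                 sections[current_section] += line + "\n"
--
--     return sections
-- ===== SOURCE B (Python) =====
-- def parse_resume_sections(text: str):
--     """Two-pass: segment lines by section first, then assemble each section once."""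
--     section_patterns = {
--         "experience": ["experience", "work history", "employment", "professional experience"],
--         "education": ["education", "academic background", "qualifications"],
--         "skills": ["skills", "technical skills", "competencies", "technologies"],
--         "projects": ["projects", "personal projects", "side projects"],
--         "certifications": ["certifications", "certificates", "licenses"],
--         "summary": ["summary", "objective", "profile", "about"]
--     }
--
--     def classify(line):
--         line_lower = line.lower().strip()
--         for section, patterns in section_patterns.items():
--             if any(p in line_lower for p in patterns):
--                 return section
--         return None
--
--     # pass 1: cut the lines into labeled segments (header lines excluded)
--     segments = []
--     cur_label, cur_lines = "summary", []
--     for line in text.split('\n'):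
--         label = classify(line)
--         if label is not None:
--             segments.append((cur_label, cur_lines))
--             cur_label, cur_lines = label, []
--         elif line.strip():
--             cur_lines = cur_lines + [line]
--     segments.append((cur_label, cur_lines))
--
--     # pass 2: assemble each fixed section from its segments
--     keys = ["contact_info", "summary", "experience", "education",
--             "skills", "projects", "certifications"]
--     return {k: "".join(l + "\n" for lab, ls in segments if lab == k for l in ls)
--             for k in keys}
-- ===== Notes on version B (the rewrite author's own statement) =====
-- stated objective: alternative
-- what changed: A mutates a per-section dict entry on every content line while scanning; B first cuts the lines into labeled segments (header lines excluded) and then assembles each of the seven fixed sections once from its segments.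
import Mathlib
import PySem

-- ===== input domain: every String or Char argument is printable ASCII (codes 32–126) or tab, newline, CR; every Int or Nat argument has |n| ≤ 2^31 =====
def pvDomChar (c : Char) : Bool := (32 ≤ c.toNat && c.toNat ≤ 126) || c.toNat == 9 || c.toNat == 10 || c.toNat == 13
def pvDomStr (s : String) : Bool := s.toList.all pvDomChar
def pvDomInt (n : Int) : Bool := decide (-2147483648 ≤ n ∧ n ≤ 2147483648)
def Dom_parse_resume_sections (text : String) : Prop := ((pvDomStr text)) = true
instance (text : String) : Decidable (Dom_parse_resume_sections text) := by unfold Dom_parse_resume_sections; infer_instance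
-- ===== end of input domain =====

-- B replaces A's scan-and-mutate-a-dict-entry loop by a two-pass decomposition: cut the lines
-- into labeled segments first, then assemble each of the seven fixed sections once (objective:
-- alternative decomposition; equivalence is about the return value).

-- shared module constant: the section-header patterns, in A's insertion order
def pvSectionPatterns : List (String × List String) :=
  [("experience", ["experience", "work history", "employment", "professional experience"]),
   ("education", ["education", "academic background", "qualifications"]),
   ("skills", ["skills", "technical skills", "competencies", "technologies"]),
   ("projects", ["projects", "personal projects", "side projects"]),
   ("certifications", ["certifications", "certificates", "licenses"]),
   ("summary", ["summary", "objective", "profile", "about"])]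

-- ===== PORT A =====
-- loop body of A's 'for line in lines' (the for/else over the patterns dict = first match via find?)
def pvStepA (st : PySem.Dict String String × String) (line : String) :
    PySem.Dict String String × String :=
  match pvSectionPatterns.find?
      (fun sp => sp.2.any (fun p => PySem.Str.isIn p (PySem.Str.strip (PySem.Str.lower line)))) with
  | some sp => (st.1, sp.1)
  | none =>
    if PySem.Str.strip line ≠ "" then
      -- sections[current_section] += line + "\n"  (current_section is always a key of sections)
      (st.1.modify st.2 "" (fun v => v ++ line ++ "\n"), st.2)
    else st

def parse_resume_sections (text : String) : List (String × String) :=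
  let sections0 : PySem.Dict String String :=
    PySem.Dict.mk [("contact_info", ""), ("summary", ""), ("experience", ""), ("education", ""),
                   ("skills", ""), ("projects", ""), ("certifications", "")]
  let lines := (PySem.Str.split? text "\n").getD []   -- separator "\n" ≠ "", so split? is always some
  (lines.foldl pvStepA (sections0, "summary")).1.items

-- ===== PORT B =====
def pvKeys : List String :=
  ["contact_info", "summary", "experience", "education", "skills", "projects", "certifications"]

-- Source B's classify: first section (in insertion order) one of whose patterns occurs in the line
def pvClassify (line : String) : Option String :=
  (pvSectionPatterns.find?
      (fun sp => sp.2.any (fun p => PySem.Str.isIn p (PySem.Str.strip (PySem.Str.lower line))))).map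
    (fun sp => sp.1)

-- loop body of Source B's pass 1 (state: finished segments, current label, current lines)
def pvStepB (st : List (String × List String) × String × List String) (line : String) :
    List (String × List String) × String × List String :=
  match pvClassify line with
  | some lab => (st.1 ++ [(st.2.1, st.2.2)], lab, [])
  | none => if PySem.Str.strip line ≠ "" then (st.1, st.2.1, st.2.2 ++ [line]) else st

-- Source B's pass 2 for one key: "".join(l + "\n" for lab, ls in segments if lab == k for l in ls)
def pvContent (segments : List (String × List String)) (k : String) : String :=
  PySem.Str.join ""
    (((segments.filter (fun p => p.1 == k)).flatMap (fun p => p.2)).map (fun l => l ++ "\n"))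

def parse_resume_sections_alt (text : String) : List (String × String) :=
  let lines := (PySem.Str.split? text "\n").getD []
  let st := lines.foldl pvStepB ([], "summary", [])
  let segments := st.1 ++ [(st.2.1, st.2.2)]
  pvKeys.map (fun k => (k, pvContent segments k))

-- ===== PRECONDITION & SPEC =====
def Spec_parse_resume_sections (text : String) (out : List (String × String)) : Prop := out = parse_resume_sections_alt text
instance (text : String) (out : List (String × String)) : Decidable (Spec_parse_resume_sections text out) := by unfold Spec_parse_resume_sections; infer_instance

-- ===== CLAIM (what is proved, stated in full; the proofs are below) =====
def Claim_equal_parse_resume_sections : Prop := ∀ (text : String), Dom_parse_resume_sections text → Spec_parse_resume_sections text (parse_resume_sections text)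

-- ===== LEMMAS AND PROOFS =====

-- the dict A maintains, as a function of the (fixed) key list
def pvMkDict (f : String → String) : PySem.Dict String String :=
  PySem.Dict.mk (pvKeys.map (fun k => (k, f k)))

-- what A appends to key k while scanning `lines` with current section c
def pvContrib (c : String) (lines : List String) (k : String) : String :=
  match lines with
  | [] => ""
  | l :: ls =>
    match pvClassify l with
    | some s => pvContrib s ls k
    | none =>
      if PySem.Str.strip l ≠ "" then
        (if k = c then (l ++ "\n") ++ pvContrib c ls k else pvContrib c ls k)
      else pvContrib c ls k

-- the segment list B's pass 1 produces from current segment (c, cur) and remaining lines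
def pvSegsOf (c : String) (cur : List String) (lines : List String) :
    List (String × List String) :=
  match lines with
  | [] => [(c, cur)]
  | l :: ls =>
    match pvClassify l with
    | some s => (c, cur) :: pvSegsOf s [] ls
    | none =>
      if PySem.Str.strip l ≠ "" then pvSegsOf c (cur ++ [l]) ls else pvSegsOf c cur ls

def pvJ (cur : List String) : String := PySem.Str.join "" (cur.map (fun l => l ++ "\n"))

-- unfolding lemmas, phrased through pvClassify

lemma pvStepA_some (st : PySem.Dict String String × String) (l s : String)
    (h : pvClassify l = some s) : pvStepA st l = (st.1, s) := by
  unfold pvClassify at h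
  unfold pvStepA
  cases hf : pvSectionPatterns.find?
      (fun sp => sp.2.any (fun p => PySem.Str.isIn p (PySem.Str.strip (PySem.Str.lower l)))) with
  | none => rw [hf] at h; exact absurd h (by simp)
  | some sp => rw [hf] at h; simp at h; subst h; rfl

lemma pvStepA_none (st : PySem.Dict String String × String) (l : String)
    (h : pvClassify l = none) :
    pvStepA st l = (if PySem.Str.strip l ≠ "" then
      (st.1.modify st.2 "" (fun v => v ++ l ++ "\n"), st.2) else st) := by
  unfold pvClassify at h
  unfold pvStepA
  cases hf : pvSectionPatterns.find?
      (fun sp => sp.2.any (fun p => PySem.Str.isIn p (PySem.Str.strip (PySem.Str.lower l)))) with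
  | none => rfl
  | some sp => rw [hf] at h; exact absurd h (by simp)

lemma pvStepB_some (st : List (String × List String) × String × List String) (l s : String)
    (h : pvClassify l = some s) : pvStepB st l = (st.1 ++ [(st.2.1, st.2.2)], s, []) := by
  unfold pvStepB; rw [h]

lemma pvStepB_none (st : List (String × List String) × String × List String) (l : String)
    (h : pvClassify l = none) :
    pvStepB st l = (if PySem.Str.strip l ≠ "" then (st.1, st.2.1, st.2.2 ++ [l]) else st) := by
  unfold pvStepB; rw [h]

lemma pvContrib_nil (c k : String) : pvContrib c [] k = "" := rfl

lemma pvContrib_cons_some (c l s k : String) (ls : List String) (h : pvClassify l = some s) :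
    pvContrib c (l :: ls) k = pvContrib s ls k := by
  conv_lhs => rw [pvContrib.eq_def]
  simp only [h]

lemma pvContrib_cons_none (c l k : String) (ls : List String) (h : pvClassify l = none) :
    pvContrib c (l :: ls) k =
      (if PySem.Str.strip l ≠ "" then
        (if k = c then (l ++ "\n") ++ pvContrib c ls k else pvContrib c ls k)
      else pvContrib c ls k) := by
  conv_lhs => rw [pvContrib.eq_def]
  simp only [h]

lemma pvSegsOf_nil (c : String) (cur : List String) : pvSegsOf c cur [] = [(c, cur)] := rfl

lemma pvSegsOf_cons_some (c l s : String) (cur ls : List String) (h : pvClassify l = some s) :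
    pvSegsOf c cur (l :: ls) = (c, cur) :: pvSegsOf s [] ls := by
  conv_lhs => rw [pvSegsOf.eq_def]
  simp only [h]

lemma pvSegsOf_cons_none (c l : String) (cur ls : List String) (h : pvClassify l = none) :
    pvSegsOf c cur (l :: ls) =
      (if PySem.Str.strip l ≠ "" then pvSegsOf c (cur ++ [l]) ls else pvSegsOf c cur ls) := by
  conv_lhs => rw [pvSegsOf.eq_def]
  simp only [h]

lemma pvClassify_mem (line s : String) (h : pvClassify line = some s) : s ∈ pvKeys := by
  unfold pvClassify at h
  rcases Option.map_eq_some_iff.mp h with ⟨sp, hsp, rfl⟩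
  have hm := List.mem_of_find?_eq_some hsp
  fin_cases hm <;> simp [pvKeys]

lemma pvModify_mkDict (f : String → String) (g : String → String) (c : String)
    (hc : c ∈ pvKeys) :
    (pvMkDict f).modify c "" g = pvMkDict (fun k => if k = c then g (f k) else f k) := by
  fin_cases hc <;>
    simp [pvMkDict, pvKeys, PySem.Dict.modify, PySem.Dict.insert, PySem.Dict.contains,
      PySem.Dict.getD, PySem.Dict.get?]

lemma pvMkDict_congr (f g : String → String) (h : ∀ k, f k = g k) : pvMkDict f = pvMkDict g := by
  unfold pvMkDict
  congr 1
  exact List.map_congr_left (fun k _ => by rw [h k])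

lemma pvFoldA (lines : List String) : ∀ (c : String) (f : String → String), c ∈ pvKeys →
    (lines.foldl pvStepA (pvMkDict f, c)).1 =
      pvMkDict (fun k => f k ++ pvContrib c lines k) := by
  induction lines with
  | nil =>
      intro c f hc
      exact pvMkDict_congr _ _ (fun k => (String.append_empty).symm)
  | cons l ls ih =>
      intro c f hc
      rw [List.foldl_cons]
      cases h : pvClassify l with
      | some s =>
          rw [pvStepA_some _ l s h]
          rw [ih s f (pvClassify_mem l s h)]
          exact pvMkDict_congr _ _ (fun k => by rw [pvContrib_cons_some c l s k ls h])
      | none =>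
          rw [pvStepA_none _ l h]
          by_cases hs : PySem.Str.strip l ≠ ""
          · rw [if_pos hs]
            rw [pvModify_mkDict f (fun v => v ++ l ++ "\n") c hc]
            rw [ih c _ hc]
            refine pvMkDict_congr _ _ (fun k => ?_)
            rw [pvContrib_cons_none c l k ls h, if_pos hs]
            by_cases hk : k = c
            · simp only [if_pos hk, String.append_assoc]
            · rw [if_neg hk, if_neg hk]
          · rw [if_neg hs]
            rw [ih c f hc]
            refine pvMkDict_congr _ _ (fun k => ?_)
            rw [pvContrib_cons_none c l k ls h, if_neg hs]

lemma pvFoldB (lines : List String) :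
    ∀ (segs : List (String × List String)) (c : String) (cur : List String),
    (lines.foldl pvStepB (segs, c, cur)).1 ++
        [((lines.foldl pvStepB (segs, c, cur)).2.1, (lines.foldl pvStepB (segs, c, cur)).2.2)] =
      segs ++ pvSegsOf c cur lines := by
  induction lines with
  | nil => intro segs c cur; rw [pvSegsOf_nil]; rfl
  | cons l ls ih =>
      intro segs c cur
      rw [List.foldl_cons]
      cases h : pvClassify l with
      | some s =>
          rw [pvStepB_some _ l s h, pvSegsOf_cons_some c l s cur ls h]
          rw [ih (segs ++ [(c, cur)]) s []]
          rw [List.append_assoc]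
          rfl
      | none =>
          rw [pvStepB_none _ l h, pvSegsOf_cons_none c l cur ls h]
          by_cases hs : PySem.Str.strip l ≠ ""
          · rw [if_pos hs, if_pos hs, ih segs c (cur ++ [l])]
          · rw [if_neg hs, if_neg hs, ih segs c cur]

lemma pvJoin_empty_cons (a : String) (l : List String) :
    PySem.Str.join "" (a :: l) = a ++ PySem.Str.join "" l := by
  cases l with
  | nil => simp [PySem.Str.join, PySem.Chars.join_singleton]
  | cons b t => simp [PySem.Str.join, PySem.Chars.join_cons_cons]

lemma pvJoin_empty_nil : PySem.Str.join "" [] = "" := by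
  simp [PySem.Str.join, PySem.Chars.join, List.intercalate]

lemma pvJoin_empty_append (xs ys : List String) :
    PySem.Str.join "" (xs ++ ys) = PySem.Str.join "" xs ++ PySem.Str.join "" ys := by
  induction xs with
  | nil => rw [List.nil_append, pvJoin_empty_nil, String.empty_append]
  | cons a t iht => rw [List.cons_append, pvJoin_empty_cons, pvJoin_empty_cons, iht,
      String.append_assoc]

lemma pvContent_nil (k : String) : pvContent [] k = "" := by
  simp [pvContent, PySem.Str.join, PySem.Chars.join, List.intercalate]

lemma pvContent_cons (c : String) (cur : List String) (rest : List (String × List String))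
    (k : String) :
    pvContent ((c, cur) :: rest) k = (if k = c then pvJ cur else "") ++ pvContent rest k := by
  unfold pvContent pvJ
  by_cases h : k = c
  · subst h
    simp [pvJoin_empty_append]
  · have hck : (c == k) = false := by simp [Ne.symm h]
    simp [hck, h]

lemma pvJ_nil : pvJ [] = "" := by
  simp [pvJ, PySem.Str.join, PySem.Chars.join, List.intercalate]

lemma pvJ_append (cur : List String) (l : String) : pvJ (cur ++ [l]) = pvJ cur ++ (l ++ "\n") := by
  unfold pvJ
  rw [List.map_append, pvJoin_empty_append]
  simp [PySem.Str.join, PySem.Chars.join_singleton]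

lemma pvContent_segsOf (lines : List String) : ∀ (c : String) (cur : List String) (k : String),
    pvContent (pvSegsOf c cur lines) k = (if k = c then pvJ cur else "") ++ pvContrib c lines k := by
  induction lines with
  | nil =>
      intro c cur k
      rw [pvSegsOf_nil, pvContent_cons, pvContent_nil, pvContrib_nil, String.append_empty]
  | cons l ls ih =>
      intro c cur k
      cases h : pvClassify l with
      | some s =>
          rw [pvSegsOf_cons_some c l s cur ls h, pvContent_cons, ih s [] k, pvJ_nil,
            pvContrib_cons_some c l s k ls h]
          rw [ite_self, String.empty_append]
      | none =>
          rw [pvSegsOf_cons_none c l cur ls h, pvContrib_cons_none c l k ls h]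
          by_cases hs : PySem.Str.strip l ≠ ""
          · rw [if_pos hs, if_pos hs, ih c (cur ++ [l]) k, pvJ_append]
            by_cases hk : k = c
            · simp only [if_pos hk, String.append_assoc]
            · simp only [if_neg hk, String.empty_append]
          · rw [if_neg hs, if_neg hs, ih c cur k]

-- ===== VERDICT (by name: the statement is the Claim_ definition above) =====
theorem parse_resume_sections_spec : Claim_equal_parse_resume_sections := by
  intro text _
  show parse_resume_sections text = parse_resume_sections_alt text
  simp only [parse_resume_sections, parse_resume_sections_alt]
  have h0 : PySem.Dict.mk [("contact_info", ""), ("summary", ""), ("experience", ""),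
      ("education", ""), ("skills", ""), ("projects", ""), ("certifications", "")] =
      pvMkDict (fun _ => "") := by rfl
  rw [h0]
  rw [pvFoldA ((PySem.Str.split? text "\n").getD []) "summary" (fun _ => "") (by decide)]
  rw [pvFoldB ((PySem.Str.split? text "\n").getD []) [] "summary" []]
  rw [List.nil_append]
  unfold pvMkDict
  refine List.map_congr_left (fun k _ => ?_)
  simp only [pvContent_segsOf, pvJ_nil, ite_self, String.empty_append]
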